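-- pv_equiv track=rewrite | github.com/Emball/Embot | import_history.py | validate_artwork
-- ===== SOURCE A (Python) =====
-- from typing import List, Dict, Optional, Tuple, Any
--
-- def validate_artwork(attachments: List[Dict]) -> Tuple[bool, Optional[str]]:
--     """Replicate SubmissionValidator.validate_artwork logic"""
--     valid_exts = ['.jpg', '.jpeg', '.png', '.gif', '.webp']
--
--     thumbnail = None
--     has_image = False
--
--     for att in attachments:
--         url = att.get('url', '').lower()
--         filename = att.get('fileName', '').lower()
--
--         # Check URL (before query params), filename, or contentType for image indicators
--         # Split URL at '?' to remove query parameters before checking extension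
--         url_without_params = url.split('?')[0]
--
--         is_image = (
--             any(url_without_params.endswith(ext) for ext in valid_exts) or
--             any(filename.endswith(ext) for ext in valid_exts) or
--             'image' in att.get('contentType', '')
--         )
--
--         if is_image:
--             has_image = True
--             if not thumbnail:
--                 thumbnail = att.get('url')
--
--     return has_image, thumbnail
-- ===== SOURCE B (Python) =====
-- from typing import List, Dict, Optional, Tuple
--
-- def validate_artwork(attachments: List[Dict]) -> Tuple[bool, Optional[str]]:
--     valid_exts = ('.jpg', '.jpeg', '.png', '.gif', '.webp')
--
--     def is_image(att):
--         return (att.get('url', '').lower().split('?')[0].endswith(valid_exts)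
--                 or att.get('fileName', '').lower().endswith(valid_exts)
--                 or 'image' in att.get('contentType', ''))
--
--     has_image = any(is_image(att) for att in attachments)
--     thumbnail = next((att.get('url') for att in attachments
--                       if is_image(att) and att.get('url')), None)
--     return has_image, thumbnail
-- ===== Notes on version B (the rewrite author's own statement) =====
-- stated objective: idiomatic
-- what changed: Replaces the single fused accumulation loop carrying (has_image, thumbnail) state with an extracted is_image predicate plus two declarative passes: any() for has_image and next() over a generator for the first image attachment with a truthy url.
-- intended difference: On inputs where every image attachment's url is missing or empty and the last image attachment's url is the empty string, A returns that leftover '' as the thumbnail (an artefact of its 'if not thumbnail' reassignment) while B returns None, the intended 'no usable thumbnail' value. — e.g. on validate_artwork([[("url", ""), ("contentType", "image/png")]]): A returns (true, some ""), B returns (true, none)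
import Mathlib
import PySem

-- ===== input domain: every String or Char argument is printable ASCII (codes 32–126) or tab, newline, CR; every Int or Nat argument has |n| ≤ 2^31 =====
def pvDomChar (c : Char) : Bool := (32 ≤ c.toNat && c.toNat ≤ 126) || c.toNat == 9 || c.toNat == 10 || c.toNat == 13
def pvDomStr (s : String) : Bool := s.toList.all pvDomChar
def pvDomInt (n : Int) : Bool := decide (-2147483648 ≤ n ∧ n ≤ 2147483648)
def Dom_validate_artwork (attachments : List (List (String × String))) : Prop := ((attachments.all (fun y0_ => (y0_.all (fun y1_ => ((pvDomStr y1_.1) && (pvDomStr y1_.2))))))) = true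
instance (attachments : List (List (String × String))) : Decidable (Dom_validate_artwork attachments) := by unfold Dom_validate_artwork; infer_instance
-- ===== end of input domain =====

-- B extracts an is_image predicate and replaces A's fused state-carrying loop by two declarative
-- passes (any / first-match); intended difference: where every image url is falsy A can return a
-- leftover '' thumbnail, B returns none (objective: idiomatic; no speed claim).


-- ===== PORT A =====
-- A's per-attachment is_image test, exactly as the loop body computes it (valid_exts inlined)
def aIsImage (att : List (String × String)) : Bool :=
  let valid_exts : List String := [".jpg", ".jpeg", ".png", ".gif", ".webp"]
  let url := PySem.Str.lower (PySem.Dict.getD ⟨att⟩ "url" "")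
  let filename := PySem.Str.lower (PySem.Dict.getD ⟨att⟩ "fileName" "")
  let url_without_params := ((PySem.Str.split? url "?").getD []).headD ""
  valid_exts.any (fun ext => PySem.Str.endswith url_without_params ext) ||
  valid_exts.any (fun ext => PySem.Str.endswith filename ext) ||
  PySem.Str.isIn "image" (PySem.Dict.getD ⟨att⟩ "contentType" "")

-- one iteration of A's for-loop: state = (has_image, thumbnail); `not thumbnail` = None or ''
def aStep (st : Bool × Option String) (att : List (String × String)) : Bool × Option String :=
  if aIsImage att then
    (true, if st.2.getD "" = "" then PySem.Dict.get? ⟨att⟩ "url" else st.2)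
  else st

def validate_artwork (attachments : List (List (String × String))) : Bool × Option String :=
  attachments.foldl aStep (false, none)

-- ===== PORT B =====
def bValidExts : List String := [".jpg", ".jpeg", ".png", ".gif", ".webp"]

-- s.endswith(valid_exts): suffix test against the whole tuple at once
def bHasExt (s : String) : Bool := bValidExts.any (fun e => PySem.Str.endswith s e)

def bIsImage (att : List (String × String)) : Bool :=
  bHasExt (((PySem.Str.split? (PySem.Str.lower (PySem.Dict.getD ⟨att⟩ "url" "")) "?").getD []).headD "") ||
  bHasExt (PySem.Str.lower (PySem.Dict.getD ⟨att⟩ "fileName" "")) ||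
  PySem.Str.isIn "image" (PySem.Dict.getD ⟨att⟩ "contentType" "")

-- att.get('url') is truthy: key present with a non-empty value
def bTruthyUrl (att : List (String × String)) : Bool :=
  !((PySem.Dict.get? ⟨att⟩ "url").getD "" = "")

def validate_artwork_alt (attachments : List (List (String × String))) : Bool × Option String :=
  (attachments.any bIsImage,
   (attachments.find? (fun att => bIsImage att && bTruthyUrl att)).bind
     (fun att => PySem.Dict.get? ⟨att⟩ "url"))

-- ===== PRECONDITION & SPEC =====
-- On inputs where every image attachment's url is missing or empty and the last image attachment's
-- url is the empty string, A returns that leftover '' as the thumbnail (an artefact of its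
-- `if not thumbnail` reassignment) while B returns None, the intended 'no usable thumbnail' value.
def D_validate_artwork (attachments : List (List (String × String))) : Prop :=
  (∀ att ∈ attachments, aIsImage att → (att.lookup "url").getD "" = "") ∧
  (attachments.filter aIsImage).getLast?.bind (fun att => att.lookup "url") = some ""

instance (attachments : List (List (String × String))) : Decidable (D_validate_artwork attachments) := by
  unfold D_validate_artwork; infer_instance

def Spec_validate_artwork (attachments : List (List (String × String))) (out : Bool × Option String) : Prop := ¬ D_validate_artwork attachments → out = validate_artwork_alt attachments
instance (attachments : List (List (String × String))) (out : Bool × Option String) : Decidable (Spec_validate_artwork attachments out) := by unfold Spec_validate_artwork; infer_instance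

def pvDiffWitness_validate_artwork : (List (List (String × String))) :=
  [[("url", ""), ("contentType", "image/png")]]

def pvDiffWitnessOut_validate_artwork : (Bool × Option String) × (Bool × Option String) :=
  ((true, some ""), (true, none))

-- ===== CLAIM (what is proved, stated in full; the proofs are below) =====
def Claim_unchanged_validate_artwork : Prop := ∀ (attachments : List (List (String × String))), Dom_validate_artwork attachments → Spec_validate_artwork attachments (validate_artwork attachments)
def Claim_changed_validate_artwork : Prop := Dom_validate_artwork (pvDiffWitness_validate_artwork) ∧ D_validate_artwork (pvDiffWitness_validate_artwork) ∧ validate_artwork (pvDiffWitness_validate_artwork) = pvDiffWitnessOut_validate_artwork.1 ∧ validate_artwork_alt (pvDiffWitness_validate_artwork) = pvDiffWitnessOut_validate_artwork.2 ∧ pvDiffWitnessOut_validate_artwork.1 ≠ pvDiffWitnessOut_validate_artwork.2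
def Claim_exact_validate_artwork : Prop := ∀ (attachments : List (List (String × String))), Dom_validate_artwork attachments → D_validate_artwork attachments → validate_artwork attachments ≠ validate_artwork_alt attachments

-- ===== LEMMAS AND PROOFS =====

lemma aIsImage_eq (att : List (String × String)) : aIsImage att = bIsImage att := rfl

lemma filter_aIsImage (atts : List (List (String × String))) :
    atts.filter aIsImage = atts.filter bIsImage :=
  List.filter_congr (fun a _ => aIsImage_eq a)

lemma lookup_eq (att : List (String × String)) (k : String) :
    List.lookup k att = PySem.Dict.get? ⟨att⟩ k := by
  induction att with
  | nil => rfl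
  | cons p t ih =>
    obtain ⟨a, b⟩ := p
    by_cases h : k = a
    · subst h; simp [List.lookup, PySem.Dict.get?]
    · have hb : (k == a) = false := by simp [h]
      have hb2 : (a == k) = false := by simp [Ne.symm h]
      simp [List.lookup, hb, hb2, PySem.Dict.get?, ih]

lemma aStep_eq (st : Bool × Option String) (att : List (String × String)) :
    aStep st att =
      if bIsImage att then
        (true, if st.2.getD "" = "" then PySem.Dict.get? ⟨att⟩ "url" else st.2)
      else st := rfl

-- first component of A's fold: has_image = any image seen
lemma fold_fst (atts : List (List (String × String))) (st : Bool × Option String) :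
    (atts.foldl aStep st).1 = (st.1 || atts.any bIsImage) := by
  induction atts generalizing st with
  | nil => simp
  | cons a l ih =>
    simp only [List.foldl_cons, List.any_cons, ih, aStep_eq]
    by_cases h : bIsImage a = true <;> simp [h]

-- second component of A's fold: the `if not thumbnail` accumulation over the image urls
lemma fold_snd (atts : List (List (String × String))) (st : Bool × Option String) :
    (atts.foldl aStep st).2 =
      ((atts.filter bIsImage).map (fun a => PySem.Dict.get? ⟨a⟩ "url")).foldl
        (fun acc u => if acc.getD "" = "" then u else acc) st.2 := by
  induction atts generalizing st with
  | nil => rfl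
  | cons a l ih =>
    simp only [List.foldl_cons, aStep_eq, List.filter_cons]
    by_cases h : bIsImage a = true <;> simp [h, ih]

-- characterisation of that accumulation from a falsy start: first truthy element, else the last
lemma firstOr_char (us : List (Option String)) :
    us.foldl (fun acc u => if acc.getD "" = "" then u else acc) none =
      (us.find? (fun u => !(u.getD "" = ""))).getD (us.getLast?.getD none) := by
  suffices h : ∀ (us : List (Option String)) (t : Option String),
      us.foldl (fun acc u => if acc.getD "" = "" then u else acc) t =
        if t.getD "" = "" then (us.find? (fun u => !(u.getD "" = ""))).getD (us.getLast?.getD t)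
        else t by
    simpa using h us none
  intro us
  induction us with
  | nil => intro t; by_cases h : t.getD "" = "" <;> simp [h]
  | cons u l ih =>
    intro t
    simp only [List.foldl_cons]
    by_cases ht : t.getD "" = ""
    · rw [if_pos ht, if_pos ht, ih u]
      by_cases hu : u.getD "" = ""
      · simp [hu, List.getLast?_cons]
      · simp [hu]
    · simp [ht, ih]

lemma fold_snd_char (atts : List (List (String × String))) :
    (validate_artwork atts).2 =
      (((atts.filter bIsImage).map (fun a => PySem.Dict.get? ⟨a⟩ "url")).find?
          (fun u => !(u.getD "" = ""))).getD
        ((atts.filter bIsImage).getLast?.bind (fun a => PySem.Dict.get? ⟨a⟩ "url")) := by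
  rw [validate_artwork, fold_snd, firstOr_char, List.getLast?_map]
  rcases (atts.filter bIsImage).getLast? with _ | a <;> rfl

-- B's find? over the whole list as a find? over the filtered url list
lemma b_thumb_eq (atts : List (List (String × String))) :
    (validate_artwork_alt atts).2 =
      (((atts.filter bIsImage).map (fun a => PySem.Dict.get? ⟨a⟩ "url")).find?
          (fun u => !(u.getD "" = ""))).bind id := by
  simp only [validate_artwork_alt]
  induction atts with
  | nil => rfl
  | cons a l ih =>
    by_cases hi : bIsImage a = true
    · by_cases ht : bTruthyUrl a = true
      · have hu : (!decide ((PySem.Dict.get? ⟨a⟩ "url").getD "" = "")) = true := by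
          simpa [bTruthyUrl] using ht
        simp [hi, ht, hu]
      · have hu : (!decide ((PySem.Dict.get? ⟨a⟩ "url").getD "" = "")) = false := by
          simpa [bTruthyUrl] using ht
        simp [hi, ht, hu, ih]
    · simp [hi, ih]

lemma falsy_of_mem {atts : List (List (String × String))}
    (hfalsy : ∀ att ∈ atts, bIsImage att → (PySem.Dict.get? ⟨att⟩ "url").getD "" = "")
    {u : Option String}
    (hu : u ∈ (atts.filter bIsImage).map (fun a => PySem.Dict.get? ⟨a⟩ "url")) :
    u.getD "" = "" := by
  rcases List.mem_map.1 hu with ⟨a, ha, rfl⟩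
  rcases List.mem_filter.1 ha with ⟨ha1, ha2⟩
  exact hfalsy a ha1 ha2

-- D_'s lookup-based url access agrees with the ports' dict access
lemma lookD_eq (att : List (String × String)) :
    (att.lookup "url").getD "" = (PySem.Dict.get? ⟨att⟩ "url").getD "" := by
  rw [lookup_eq]

-- ===== VERDICT (by name: the statement is the Claim_ definition above) =====
theorem validate_artwork_spec : Claim_unchanged_validate_artwork := by
  intro atts _ hD
  have hfst : (validate_artwork atts).1 = (validate_artwork_alt atts).1 := by
    simpa [validate_artwork_alt] using fold_fst atts (false, none)
  have hsnd : (validate_artwork atts).2 = (validate_artwork_alt atts).2 := by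
    rw [fold_snd_char, b_thumb_eq]
    rcases hfind : ((atts.filter bIsImage).map (fun a => PySem.Dict.get? ⟨a⟩ "url")).find?
        (fun u => !(u.getD "" = "")) with _ | u
    · rw [hfind]
      show (atts.filter bIsImage).getLast?.bind (fun a => PySem.Dict.get? ⟨a⟩ "url") = none
      have hfalsy : ∀ att ∈ atts, bIsImage att → (PySem.Dict.get? ⟨att⟩ "url").getD "" = "" := by
        intro a ha hi
        have := List.find?_eq_none.1 hfind (PySem.Dict.get? ⟨a⟩ "url")
          (List.mem_map_of_mem (List.mem_filter.2 ⟨ha, hi⟩))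
        simpa using this
      rcases hlast : (atts.filter bIsImage).getLast? with _ | a
      · rfl
      · have hmem : PySem.Dict.get? ⟨a⟩ "url" ∈
            (atts.filter bIsImage).map (fun a => PySem.Dict.get? ⟨a⟩ "url") :=
          List.mem_map_of_mem (List.mem_of_getLast? hlast)
        have hf := falsy_of_mem hfalsy hmem
        rcases hu : PySem.Dict.get? ⟨a⟩ "url" with _ | s
        · simp [hu]
        · have hs : s = "" := by simpa [hu] using hf
          exfalso
          apply hD
          refine ⟨fun att hm hi => by rw [lookD_eq]; exact hfalsy att hm ((aIsImage_eq att) ▸ hi), ?_⟩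
          rw [filter_aIsImage, hlast]
          show List.lookup "url" a = some ""
          rw [lookup_eq]
          exact hs ▸ hu
    · simp [hfind]
  exact Prod.ext hfst hsnd

theorem validate_artwork_changed : Claim_changed_validate_artwork := by
  unfold Claim_changed_validate_artwork; decide

theorem validate_artwork_tight : Claim_exact_validate_artwork := by
  intro atts _ hD heq
  obtain ⟨hfalsy0, hlast⟩ := hD
  rw [filter_aIsImage] at hlast
  have hfalsy : ∀ att ∈ atts, bIsImage att → (PySem.Dict.get? ⟨att⟩ "url").getD "" = "" :=
    fun att hm hi => by rw [← lookD_eq]; exact hfalsy0 att hm ((aIsImage_eq att) ▸ hi)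
  rcases hl : (atts.filter bIsImage).getLast? with _ | a
  · rw [hl] at hlast; simp at hlast
  · have hfind : ((atts.filter bIsImage).map (fun a => PySem.Dict.get? ⟨a⟩ "url")).find?
        (fun u => !(u.getD "" = "")) = none := by
      rw [List.find?_eq_none]
      intro u hu
      simp [falsy_of_mem hfalsy hu]
    have hA : (validate_artwork atts).2 = some "" := by
      rw [hl] at hlast
      have hget : PySem.Dict.get? ⟨a⟩ "url" = some "" := by
        rw [← lookup_eq]
        simpa using hlast
      rw [fold_snd_char, hfind, hl]
      exact hget
    have hB : (validate_artwork_alt atts).2 = none := by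
      rw [b_thumb_eq, hfind]; rfl
    rw [heq, hB] at hA
    simp at hA
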